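-- pv_equiv track=rewrite | github.com/schneidev/aoc2022 | day03/part2.py | compute
-- ===== SOURCE A (Python) =====
-- def get_priority(item):
--     base = ord("a") - 1 if item.islower() else ord("A") - 27
--     return ord(item) - base
--
-- def compute(input):
--     sum_of_priorities = 0
--     it = iter(input)
--     for i in range(0, len(input), 3):
--         backpack1 = set(input[i].strip())
--         backpack2 = set(input[i+1].strip())
--         backpack3 = set(input[i+2].strip())
--
--         shared_items = backpack1.intersection(
--             backpack2).intersection(backpack3)
--         for shared_item in shared_items:
--             sum_of_priorities += get_priority(shared_item)
--
--     return sum_of_priorities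
-- ===== SOURCE B (Python) =====
-- def compute(input):
--     total = 0
--     for i in range(0, len(input), 3):
--         pool = [c for line in (input[i], input[i+1], input[i+2])
--                 for c in dict.fromkeys(line.strip())]
--         counts = {}
--         for c in pool:
--             counts[c] = counts.get(c, 0) + 1
--         for c, n in counts.items():
--             if n == 3:
--                 total += ord(c) - 96 if c.islower() else ord(c) - 38
--     return total
-- ===== Notes on version B (the rewrite author's own statement) =====
-- stated objective: alternative
-- what changed: Per triple, B replaces the two set-intersection passes by one flat pool of per-line distinct characters, counts occurrences in a dict and sums the priorities of characters counted three times (priority inlined as an ord formula).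
import Mathlib
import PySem

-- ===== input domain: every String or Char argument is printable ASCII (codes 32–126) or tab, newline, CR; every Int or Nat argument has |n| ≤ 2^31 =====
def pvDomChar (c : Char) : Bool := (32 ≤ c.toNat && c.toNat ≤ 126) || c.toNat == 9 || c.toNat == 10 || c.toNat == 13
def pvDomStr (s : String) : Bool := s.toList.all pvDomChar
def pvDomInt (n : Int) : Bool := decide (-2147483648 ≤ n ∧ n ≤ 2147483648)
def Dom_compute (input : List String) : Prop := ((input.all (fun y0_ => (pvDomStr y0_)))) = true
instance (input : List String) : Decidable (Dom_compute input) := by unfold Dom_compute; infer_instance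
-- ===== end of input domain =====

-- B trades A's two set intersections for one counting pass over the pooled distinct characters of each triple (alternative structure, no speed claim).

-- ===== PORT A =====
def get_priority (item : Char) : Int :=
  let base : Int := if PySem.Chars.islower item then (97 : Int) - 1 else (65 : Int) - 27
  (item.toNat : Int) - base

def compute (input : List String) : Int :=
  (PySem.List.pyRange 0 (PySem.List.len input) 3).foldl (fun sum_of_priorities i =>
    let backpack1 : PySem.Set Char := PySem.Set.ofList (PySem.Str.strip (PySem.List.pyGetD input i "")).toList
    let backpack2 : PySem.Set Char := PySem.Set.ofList (PySem.Str.strip (PySem.List.pyGetD input (i+1) "")).toList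
    let backpack3 : PySem.Set Char := PySem.Set.ofList (PySem.Str.strip (PySem.List.pyGetD input (i+2) "")).toList
    let shared_items := PySem.Set.inter (PySem.Set.inter backpack1 backpack2) backpack3
    shared_items.foldl (fun s c => s + get_priority c) sum_of_priorities) 0

-- ===== PORT B =====
def compute_alt (input : List String) : Int :=
  (PySem.List.pyRange 0 (PySem.List.len input) 3).foldl (fun total i =>
    let pool := ([PySem.List.pyGetD input i "", PySem.List.pyGetD input (i+1) "",
                  PySem.List.pyGetD input (i+2) ""]).flatMap
        (fun line => PySem.List.dedup (PySem.Str.strip line).toList)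
    let counts := pool.foldl (fun d c => d.insert c (d.getD c 0 + 1))
        (PySem.Dict.empty : PySem.Dict Char Int)  -- Python ints are Int
    counts.items.foldl (fun t p => if p.2 == 3 then
        t + (if PySem.Chars.islower p.1 then (p.1.toNat : Int) - 96 else (p.1.toNat : Int) - 38)
      else t) total) 0

-- ===== PRECONDITION & SPEC =====
-- Pre_ excludes exactly the inputs where both A and B raise IndexError on input[i+1] / input[i+2]
-- (length not a multiple of 3).
def Pre_compute (input : List String) : Prop := input.length % 3 = 0
instance (input : List String) : Decidable (Pre_compute input) := by unfold Pre_compute; infer_instance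
def pvWitness_compute : List String := ["vJrwpWtwJgWrhcsFMMfFFhFp", "jqHRNqRjqzjGDLGL", "PmmdzqPrVvPwwTWBwg"]

def Spec_compute (input : List String) (out : Int) : Prop := out = compute_alt input
instance (input : List String) (out : Int) : Decidable (Spec_compute input out) := by unfold Spec_compute; infer_instance

-- ===== CLAIM (what is proved, stated in full; the proofs are below) =====
def Claim_equal_compute : Prop := ∀ (input : List String), Dom_compute input → Pre_compute input → Spec_compute input (compute input)

-- ===== LEMMAS AND PROOFS =====

theorem pri_eq (c : Char) :
    get_priority c = (if PySem.Chars.islower c then (c.toNat : Int) - 96 else (c.toNat : Int) - 38) := by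
  unfold get_priority
  split <;> ring

-- filtering a Set grown by `add`s keeps only the original part when the predicate forces membership there
theorem filter_foldl_add {α : Type} [DecidableEq α] (p : α → Bool) :
    ∀ (rest s : List α), (∀ y, p y = true → y ∈ s) →
      (rest.foldl PySem.Set.add s).filter p = s.filter p := by
  intro rest
  induction rest with
  | nil => intro s _; rfl
  | cons x xs ih =>
    intro s hs
    simp only [List.foldl_cons]
    by_cases hx : x ∈ s
    · have : PySem.Set.add s x = s := by
        simp [PySem.Set.add, hx]
      rw [this]; exact ih s hs
    · have hadd : PySem.Set.add s x = s ++ [x] := by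
        simp [PySem.Set.add, hx]
      rw [hadd, ih (s ++ [x]) (fun y hy => List.mem_append_left _ (hs y hy))]
      have hpx : p x = false := by
        by_contra h
        exact hx (hs x (by simpa using h))
      simp [List.filter_append, hpx]

-- per-triple core: intersection-sum (A) equals count-to-3 sum (B)
theorem group_core (t1 t2 t3 : List Char) (acc : Int) :
    (PySem.Set.inter (PySem.Set.inter (PySem.Set.ofList t1) (PySem.Set.ofList t2)) (PySem.Set.ofList t3)).foldl
      (fun s c => s + get_priority c) acc
    = ((PySem.Set.ofList t1 ++ (PySem.Set.ofList t2 ++ (PySem.Set.ofList t3 ++ []))).foldl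
        (fun (d : PySem.Dict Char Int) c => d.insert c (d.getD c 0 + 1)) PySem.Dict.empty).items.foldl
        (fun t (p : Char × Int) => if p.2 == 3 then
          t + (if PySem.Chars.islower p.1 then (p.1.toNat : Int) - 96 else (p.1.toNat : Int) - 38)
        else t) acc := by
  set s1 := PySem.Set.ofList t1 with hs1
  set s2 := PySem.Set.ofList t2 with hs2
  set s3 := PySem.Set.ofList t3 with hs3
  have n1 : s1.Nodup := PySem.Set.nodup_ofList t1
  have n2 : s2.Nodup := PySem.Set.nodup_ofList t2
  have n3 : s3.Nodup := PySem.Set.nodup_ofList t3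
  set pool := s1 ++ (s2 ++ (s3 ++ [])) with hpool
  -- A side
  rw [PySem.List.foldl_add]
  -- B side
  rw [PySem.Dict.foldl_insert_getD_add_one_eq_counter, PySem.Dict.items_counter,
      PySem.List.foldl_if_eq_foldl_filter, List.filter_map, List.foldl_map, PySem.List.foldl_add]
  -- count bound for elements outside s1
  have hcount : ∀ y, List.count y pool = List.count y s1 + (List.count y s2 + (List.count y s3 + List.count y ([] : List Char))) := by
    intro y; simp [hpool, List.count_append]
  have hmem : ∀ y : Char, (((List.count y pool : Int) == 3) = true) → y ∈ s1 := by
    intro y hy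
    have h3 : List.count y pool = 3 := by
      have := (beq_iff_eq).mp hy
      exact_mod_cast this
    by_contra hn
    have h1 : List.count y s1 = 0 := List.count_eq_zero.mpr hn
    have h2 : List.count y s2 ≤ 1 := List.nodup_iff_count_le_one.mp n2 y
    have h3' : List.count y s3 ≤ 1 := List.nodup_iff_count_le_one.mp n3 y
    have := hcount y
    simp at this
    omega
  have hofpool : PySem.Set.ofList pool = (s2 ++ (s3 ++ [])).foldl PySem.Set.add s1 := by
    rw [PySem.Set.ofList_eq_foldl, hpool, List.foldl_append]
    have : List.foldl PySem.Set.add ([] : PySem.Set Char) s1 = s1 := by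
      rw [← PySem.Set.ofList_eq_foldl]
      exact PySem.Set.ofList_eq_self_of_nodup s1 n1
    rw [this]
  rw [hofpool, filter_foldl_add _ _ _ (by
    intro y hy
    exact hmem y (by simpa using hy))]
  -- the two filtered lists over s1 coincide
  have hfilter : s1.filter (((fun p => p.2 == (3:Int)) ∘ fun k => (k, (List.count k pool : Int))))
      = (s1.filter (fun x => PySem.Set.contains s2 x)).filter (fun x => PySem.Set.contains s3 x) := by
    rw [List.filter_filter]
    apply List.filter_congr
    intro y hy
    have c1 : List.count y s1 = 1 := List.count_eq_one_of_mem n1 hy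
    have e2 : PySem.Set.contains s2 y = decide (y ∈ s2) := by
      simp [PySem.Set.contains_eq_listContains]
    have e3 : PySem.Set.contains s3 y = decide (y ∈ s3) := by
      simp [PySem.Set.contains_eq_listContains]
    have hc2 : List.count y s2 = (if y ∈ s2 then 1 else 0) := by
      split
      · exact List.count_eq_one_of_mem n2 ‹_›
      · exact List.count_eq_zero.mpr ‹_›
    have hc3 : List.count y s3 = (if y ∈ s3 then 1 else 0) := by
      split
      · exact List.count_eq_one_of_mem n3 ‹_›
      · exact List.count_eq_zero.mpr ‹_›
    by_cases m2 : y ∈ s2 <;> by_cases m3 : y ∈ s3 <;>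
      simp [Function.comp, m2, m3] <;> rw [hcount y] <;> simp [c1, hc2, hc3, m2, m3]
  rw [hfilter]
  congr 1
  exact congrArg List.sum (List.map_congr_left (fun y _ => pri_eq y))

-- ===== VERDICT (by name: the statement is the Claim_ definition above) =====
theorem compute_spec : Claim_equal_compute := by
  intro input hdom hpre
  unfold Spec_compute compute compute_alt
  apply PySem.List.foldl_congr_mem'
  intro i hi acc
  simp only [List.flatMap_cons, List.flatMap_nil, PySem.List.dedup_eq_ofList]
  apply group_core
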